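-- pv_equiv track=rewrite | github.com/GanizaniSitara/concepts | graph_layout.py | calculate_cluster_label_anchor
-- ===== SOURCE A (Python) =====
-- def calculate_cluster_label_anchor(app_hex_positions_map):
--     if not app_hex_positions_map: return (0, 0)
--     min_r = min(pos[1] for pos in app_hex_positions_map.values())
--     top_row_apps_pos = [pos for pos in app_hex_positions_map.values() if pos[1] == min_r]
--     if not top_row_apps_pos:
--         any_app_pos = next(iter(app_hex_positions_map.values()))
--         return (any_app_pos[0], any_app_pos[1])
--     top_row_apps_pos.sort(key=lambda pos: pos[0])
--     median_top_app_pos = top_row_apps_pos[len(top_row_apps_pos) // 2]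
--     return (median_top_app_pos[0], median_top_app_pos[1])
-- ===== SOURCE B (Python) =====
-- def calculate_cluster_label_anchor(app_hex_positions_map):
--     if not app_hex_positions_map:
--         return (0, 0)
--     vals = app_hex_positions_map.values()
--     min_r = min(r for _, r in vals)
--     xs = [x for x, r in vals if r == min_r]
--     k = len(xs) // 2
--     # upper median without sorting: the least x having more than k elements <= it
--     m = min(x for x in xs if sum(1 for y in xs if y <= x) > k)
--     return (m, min_r)
-- ===== Notes on version B (the rewrite author's own statement) =====
-- stated objective: alternative
-- what changed: Replaces sort-then-index-the-middle by a selection-by-counting pass: the median x is computed as the least x in the top row with more than len//2 elements <= it, with no sort and no list indexing; the result's r is the already-known min_r instead of re-reading it from the selected tuple.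
import Mathlib
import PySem

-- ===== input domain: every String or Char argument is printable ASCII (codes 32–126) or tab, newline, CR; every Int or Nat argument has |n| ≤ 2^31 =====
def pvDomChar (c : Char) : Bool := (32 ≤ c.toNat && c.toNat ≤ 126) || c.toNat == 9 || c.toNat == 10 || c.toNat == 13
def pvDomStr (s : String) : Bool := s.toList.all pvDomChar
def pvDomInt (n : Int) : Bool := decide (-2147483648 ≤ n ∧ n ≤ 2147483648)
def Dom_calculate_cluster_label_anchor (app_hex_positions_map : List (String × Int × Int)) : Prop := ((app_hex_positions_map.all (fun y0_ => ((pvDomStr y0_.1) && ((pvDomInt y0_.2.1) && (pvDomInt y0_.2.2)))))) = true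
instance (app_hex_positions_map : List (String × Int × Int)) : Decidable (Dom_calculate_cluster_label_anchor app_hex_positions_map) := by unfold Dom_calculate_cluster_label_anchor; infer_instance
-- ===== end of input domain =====

-- B replaces A's sort-then-index-the-middle by selection-by-counting (the least top-row x
-- with more than len//2 top-row x's ≤ it); an alternative decomposition, no speed claim.

-- ===== PORT A =====
def calculate_cluster_label_anchor (app_hex_positions_map : List (String × Int × Int)) : Int × Int :=
  if app_hex_positions_map = [] then (0, 0)
  else
    let vals := (PySem.Dict.ofList app_hex_positions_map).values
    match PySem.List.min? (vals.map (fun pos => pos.2)) (fun r => r) with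
    | none => (0, 0)  -- unreachable: the dict is nonempty, min() does not raise
    | some min_r =>
      let top_row_apps_pos := vals.filter (fun pos => pos.2 == min_r)
      if top_row_apps_pos = [] then
        match vals with
        | [] => (0, 0)  -- unreachable: next(iter(values)) of a nonempty dict
        | any_app_pos :: _ => (any_app_pos.1, any_app_pos.2)
      else
        let s := PySem.List.sorted top_row_apps_pos (fun pos => pos.1) false
        let median_top_app_pos := PySem.List.pyGetD s (PySem.Int.floordiv (s.length : Int) 2) (0, 0)
        (median_top_app_pos.1, median_top_app_pos.2)

-- ===== PORT B =====
def calculate_cluster_label_anchor_alt (app_hex_positions_map : List (String × Int × Int)) : Int × Int :=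
  if app_hex_positions_map = [] then (0, 0)
  else
    let vals := (PySem.Dict.ofList app_hex_positions_map).values
    match PySem.List.min? (vals.map (fun p => p.2)) (fun r => r) with
    | none => (0, 0)  -- unreachable: the dict is nonempty, min() does not raise
    | some min_r =>
      let xs := (vals.filter (fun p => p.2 == min_r)).map (fun p => p.1)
      let k := PySem.Int.floordiv (xs.length : Int) 2
      match PySem.List.min? (xs.filter (fun x => (xs.countP (fun y => y ≤ x) : Int) > k)) (fun x => x) with
      | none => (0, 0)  -- unreachable: the maximum of xs passes the filter
      | some m => (m, min_r)

-- ===== PRECONDITION & SPEC =====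
def Spec_calculate_cluster_label_anchor (app_hex_positions_map : List (String × Int × Int)) (out : Int × Int) : Prop := out = calculate_cluster_label_anchor_alt app_hex_positions_map
instance (app_hex_positions_map : List (String × Int × Int)) (out : Int × Int) : Decidable (Spec_calculate_cluster_label_anchor app_hex_positions_map out) := by unfold Spec_calculate_cluster_label_anchor; infer_instance

-- ===== CLAIM (what is proved, stated in full; the proofs are below) =====
def Claim_equal_calculate_cluster_label_anchor : Prop := ∀ (app_hex_positions_map : List (String × Int × Int)), Dom_calculate_cluster_label_anchor app_hex_positions_map → Spec_calculate_cluster_label_anchor app_hex_positions_map (calculate_cluster_label_anchor app_hex_positions_map)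

-- ===== LEMMAS AND PROOFS =====

-- In a fst-sorted list s, more than k elements have fst ≤ s[k].1.
theorem count_le_kth_gt {s : List (Int × Int)} {kN : Nat} (hk : kN < s.length)
    (hp : s.Pairwise (fun a b => a.1 ≤ b.1)) :
    kN < s.countP (fun p => decide (p.1 ≤ s[kN].1)) := by
  have hmono := List.pairwise_iff_getElem.mp hp
  have h2 : (s.take (kN+1)).countP (fun p => decide (p.1 ≤ s[kN].1)) = (s.take (kN+1)).length := by
    apply List.countP_eq_length.mpr
    intro a ha
    rw [List.mem_take_iff_getElem] at ha
    obtain ⟨i, hi, rfl⟩ := ha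
    simp only [decide_eq_true_eq]
    rcases Nat.lt_or_ge i kN with h | h
    · exact hmono i kN (by omega) hk h
    · have : i = kN := by omega
      subst this; simp
  have h3 : (s.take (kN+1)).length = kN + 1 := by simp; omega
  have h4 : List.countP (fun p => decide (p.1 ≤ s[kN].1)) (List.take (kN+1) s) ≤ List.countP (fun p => decide (p.1 ≤ s[kN].1)) s := (List.take_sublist (kN+1) s).countP_le
  omega

-- Any x admitting more than k elements with fst ≤ x is ≥ s[k].1.
theorem kth_le_of_count_gt {s : List (Int × Int)} {kN : Nat} (hk : kN < s.length)
    (hp : s.Pairwise (fun a b => a.1 ≤ b.1)) {x : Int}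
    (hc : kN < s.countP (fun p => decide (p.1 ≤ x))) :
    s[kN].1 ≤ x := by
  by_contra hlt
  push Not at hlt
  have hmono := List.pairwise_iff_getElem.mp hp
  have hz : (s.drop kN).countP (fun p => decide (p.1 ≤ x)) = 0 := by
    apply List.countP_eq_zero.mpr
    intro a ha
    rw [List.mem_drop_iff_getElem] at ha
    obtain ⟨i, hi, rfl⟩ := ha
    simp only [decide_eq_true_eq, not_le]
    rcases Nat.eq_zero_or_pos i with h | h
    · subst h; simpa using hlt
    · exact lt_of_lt_of_le hlt (hmono kN (kN+i) hk (by omega) (by omega))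
  have hsplit : s.countP (fun p => decide (p.1 ≤ x)) =
      (s.take kN).countP (fun p => decide (p.1 ≤ x)) + (s.drop kN).countP (fun p => decide (p.1 ≤ x)) := by
    rw [← List.countP_append, List.take_append_drop]
  have h5 := List.countP_le_length (l := s.take kN) (p := fun p => decide (p.1 ≤ x))
  have h6 : (s.take kN).length ≤ kN := by simp
  omega

-- The two tails agree for any list of values once min() has returned.
theorem anchor_core (vals : List (Int × Int)) (min_r : Int)
    (hmin : PySem.List.min? (vals.map (fun p => p.2)) (fun r => r) = some min_r) :
    (let top := vals.filter (fun pos => pos.2 == min_r)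
     let s := PySem.List.sorted top (fun pos => pos.1) false
     let median := PySem.List.pyGetD s (PySem.Int.floordiv (s.length : Int) 2) ((0:Int), (0:Int))
     ((median.1, median.2) : Int × Int)) =
    (let xs := (vals.filter (fun p => p.2 == min_r)).map (fun p => p.1)
     let k := PySem.Int.floordiv (xs.length : Int) 2
     match PySem.List.min? (xs.filter (fun x => (xs.countP (fun y => y ≤ x) : Int) > k)) (fun x => x) with
     | none => ((0:Int), (0:Int))
     | some m => (m, min_r)) := by
  simp only []
  set top := vals.filter (fun pos => pos.2 == min_r) with htopdef
  set s := PySem.List.sorted top (fun pos => pos.1) false with hsdef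
  have hperm : s.Perm top := PySem.List.sorted_perm top (fun pos => pos.1) false
  have hmem0 : min_r ∈ vals.map (fun p => p.2) := PySem.List.min?_mem hmin
  obtain ⟨p0, hp0, hp02⟩ := List.mem_map.mp hmem0
  have htopne : top ≠ [] := by
    intro h
    have : p0 ∈ top := List.mem_filter.mpr ⟨hp0, by simp [hp02]⟩
    simp [h] at this
  have hslen : s.length = top.length := by simpa using hperm.length_eq
  have hlen1 : 0 < s.length := by
    rw [hslen]; exact List.length_pos_iff.mpr htopne
  set kN := s.length / 2 with hkN
  have hklt : kN < s.length := by omega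
  have hfd : PySem.Int.floordiv (s.length : Int) 2 = ((kN : Nat) : Int) := by
    exact_mod_cast PySem.Int.floordiv_natCast s.length 2
  rw [hfd, PySem.List.pyGetD_natCast, List.getD_eq_getElem _ _ hklt]
  have hmedmem : s[kN] ∈ top := hperm.subset (List.getElem_mem hklt)
  have hmed2 : s[kN].2 = min_r := by
    have := (List.mem_filter.mp hmedmem).2
    simpa using this
  set xs := top.map (fun p => p.1) with hxsdef
  have hxlen : xs.length = s.length := by simp [hxsdef, hslen]
  have hkB : PySem.Int.floordiv (xs.length : Int) 2 = ((kN : Nat) : Int) := by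
    rw [hxlen]; exact hfd
  rw [hkB]
  have hcount : ∀ x : Int, xs.countP (fun y => decide (y ≤ x)) = s.countP (fun p => decide (p.1 ≤ x)) := by
    intro x
    rw [hxsdef, List.countP_map]
    exact (hperm.countP_eq _).symm
  have hpair : s.Pairwise (fun a b => a.1 ≤ b.1) :=
    PySem.List.sorted_pairwise top (fun pos => pos.1)
  set P : Int → Bool := fun x => decide ((xs.countP (fun y => decide (y ≤ x)) : Int) > ((kN : Nat) : Int)) with hPdef
  have hPmed : P s[kN].1 = true := by
    rw [hPdef]
    simp only [decide_eq_true_eq]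
    have := count_le_kth_gt hklt hpair
    rw [hcount]
    exact_mod_cast this
  have hmedxs : s[kN].1 ∈ xs := List.mem_map.mpr ⟨s[kN], hmedmem, rfl⟩
  have hmedF : s[kN].1 ∈ xs.filter P := List.mem_filter.mpr ⟨hmedxs, hPmed⟩
  have hFne : xs.filter P ≠ [] := List.ne_nil_of_mem hmedF
  cases hminF : PySem.List.min? (xs.filter P) (fun x => x) with
  | none => exact absurd ((PySem.List.min?_eq_none_iff _ _).mp hminF) hFne
  | some mmed =>
    have hmm : mmed ∈ xs.filter P := PySem.List.min?_mem hminF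
    have hle1 : mmed ≤ s[kN].1 := PySem.List.min?_isMin hminF _ hmedF
    have hmmP : P mmed = true := (List.mem_filter.mp hmm).2
    have hle2 : s[kN].1 ≤ mmed := by
      apply kth_le_of_count_gt hklt hpair
      rw [hPdef] at hmmP
      simp only [decide_eq_true_eq] at hmmP
      rw [hcount] at hmmP
      exact_mod_cast hmmP
    have : mmed = s[kN].1 := le_antisymm hle1 hle2
    rw [this, hmed2]

-- ===== VERDICT (by name: the statement is the Claim_ definition above) =====
theorem calculate_cluster_label_anchor_spec : Claim_equal_calculate_cluster_label_anchor := by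
  intro m _
  unfold Spec_calculate_cluster_label_anchor
  unfold calculate_cluster_label_anchor calculate_cluster_label_anchor_alt
  by_cases hm : m = []
  · simp [hm]
  · simp only [if_neg hm]
    cases hmin : PySem.List.min? (((PySem.Dict.ofList m).values).map (fun p => p.2)) (fun r => r) with
    | none => rfl
    | some min_r =>
      have hmem0 : min_r ∈ ((PySem.Dict.ofList m).values).map (fun p => p.2) := PySem.List.min?_mem hmin
      obtain ⟨p0, hp0, hp02⟩ := List.mem_map.mp hmem0
      dsimp only
      have htopne : ((PySem.Dict.ofList m).values).filter (fun pos => pos.2 == min_r) ≠ [] := by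
        intro h
        have : p0 ∈ ((PySem.Dict.ofList m).values).filter (fun pos => pos.2 == min_r) :=
          List.mem_filter.mpr ⟨hp0, by simp [hp02]⟩
        simp [h] at this
      rw [if_neg htopne]
      exact anchor_core ((PySem.Dict.ofList m).values) min_r hmin
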